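-- pv_equiv track=rewrite | github.com/Murphy-Joe/ReWordle | helper/utils.py | make_second_appearance_of_letter_uppercase
-- ===== SOURCE A (Python) =====
-- def make_second_appearance_of_letter_uppercase(word: str) -> str:
--     if len(word) == len(set(word)):
--         return word
--     word_builder = ''
--     for ltr in word:
--         if ltr not in word_builder:
--             word_builder += ltr
--         else:
--             word_builder += ltr.upper()
--     return word_builder
-- ===== SOURCE B (Python) =====
-- def make_second_appearance_of_letter_uppercase(word: str) -> str:
--     first = {}
--     for i, ch in enumerate(word):
--         first.setdefault(ch, i)
--     return ''.join(ch if first[ch] == i else ch.upper() for i, ch in enumerate(word))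
-- ===== Notes on version B (the rewrite author's own statement) =====
-- stated objective: alternative
-- what changed: A fuses detection and emission into one scan that tests each char against the incrementally built result string; B does two passes: it first builds a dict of each char's first-occurrence index, then emits each char unchanged iff its index is that first occurrence.
import Mathlib
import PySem

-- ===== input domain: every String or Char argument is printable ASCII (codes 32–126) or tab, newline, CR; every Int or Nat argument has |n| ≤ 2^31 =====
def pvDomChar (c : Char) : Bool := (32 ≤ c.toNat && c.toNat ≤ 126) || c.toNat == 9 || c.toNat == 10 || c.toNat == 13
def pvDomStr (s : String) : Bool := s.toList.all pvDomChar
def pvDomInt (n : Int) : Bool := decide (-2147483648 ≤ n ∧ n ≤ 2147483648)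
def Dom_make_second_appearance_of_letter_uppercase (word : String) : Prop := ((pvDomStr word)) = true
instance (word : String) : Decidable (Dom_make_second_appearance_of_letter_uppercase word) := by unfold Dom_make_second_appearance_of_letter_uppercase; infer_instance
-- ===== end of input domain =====

-- B replaces A's fused scan (membership test against the partially built result) by two passes:
-- a first-occurrence index table built once, then one emit pass (objective: alternative decomposition).

-- ===== PORT A =====
def make_second_appearance_of_letter_uppercase (word : String) : String :=
  if word.toList.length = (PySem.Set.ofList word.toList).length then word
  else
    String.ofList (word.toList.foldl
      (fun b c =>
        if PySem.Chars.isIn [c] b = false then b ++ [c]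
        else b ++ [PySem.Chars.upperChar c]) [])

-- ===== PORT B =====
-- first[ch] is always present at emit time; getD's default (-1) is unreachable (indices are ≥ 0).
def make_second_appearance_of_letter_uppercase_alt (word : String) : String :=
  let first : PySem.Dict Char Int :=
    (PySem.List.enumerate word.toList).foldl (fun d p => d.setdefault p.2 p.1) PySem.Dict.empty
  String.ofList ((PySem.List.enumerate word.toList).map
    (fun p => if first.getD p.2 (-1) == p.1 then p.2 else PySem.Chars.upperChar p.2))

-- ===== PRECONDITION & SPEC =====
def Spec_make_second_appearance_of_letter_uppercase (word : String) (out : String) : Prop := out = make_second_appearance_of_letter_uppercase_alt word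
instance (word : String) (out : String) : Decidable (Spec_make_second_appearance_of_letter_uppercase word out) := by unfold Spec_make_second_appearance_of_letter_uppercase; infer_instance

-- ===== CLAIM (what is proved, stated in full; the proofs are below) =====
def Claim_equal_make_second_appearance_of_letter_uppercase : Prop := ∀ (word : String), Dom_make_second_appearance_of_letter_uppercase word → Spec_make_second_appearance_of_letter_uppercase word (make_second_appearance_of_letter_uppercase word)

-- ===== LEMMAS AND PROOFS =====

-- reference: each char, uppercased iff it already occurred among the ORIGINAL chars of the prefix
def pvMark (seen : List Char) : List Char → List Char
  | [] => []
  | c :: rest => (if c ∈ seen then PySem.Chars.upperChar c else c) :: pvMark (seen ++ [c]) rest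

theorem pvUp_idem (c : Char) : PySem.Chars.upperChar (PySem.Chars.upperChar c) = PySem.Chars.upperChar c := by
  unfold PySem.Chars.upperChar PySem.Chars.islower
  split_ifs with h1 h2
  · exfalso
    simp only [decide_eq_true_eq, Bool.and_eq_true, Char.le_def] at h1 h2
    obtain ⟨a1, b1⟩ := h1
    obtain ⟨a2, _⟩ := h2
    rw [UInt32.le_iff_toNat_le] at a1 b1 a2
    simp only [Char.toNat_val] at a1 b1 a2
    have ha : ('a' : Char).toNat = 97 := by decide
    have hz : ('z' : Char).toNat = 122 := by decide
    rw [ha] at a1 a2; rw [hz] at b1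
    have h3 : (Char.ofNat (c.toNat - 32)).toNat = c.toNat - 32 := by
      rw [Char.toNat_ofNat, if_pos]
      exact Or.inl (by omega)
    rw [h3] at a2
    omega
  · rfl
  · rfl

theorem pvIsIn_singleton (c : Char) (b : List Char) : PySem.Chars.isIn [c] b = true ↔ c ∈ b := by
  rw [PySem.Chars.isIn_iff_infix]
  constructor
  · intro h; exact h.sublist.subset (by simp)
  · intro h
    obtain ⟨s, t, rfl⟩ := List.append_of_mem h
    exact ⟨s, t, by simp⟩

theorem pvIsIn_singleton_false (c : Char) (b : List Char) (h : c ∉ b) : PySem.Chars.isIn [c] b = false :=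
  Bool.eq_false_iff.2 (fun hx => h ((pvIsIn_singleton c b).1 hx))

theorem pvFoldA (rest : List Char) : ∀ (seen b : List Char),
    (∀ c, c ∈ seen → c ∈ b) →
    (∀ c, c ∈ b → c ∈ seen ∨ PySem.Chars.upperChar c = c) →
    rest.foldl (fun b c => if PySem.Chars.isIn [c] b = false then b ++ [c]
        else b ++ [PySem.Chars.upperChar c]) b = b ++ pvMark seen rest := by
  induction rest with
  | nil => intro seen b _ _; simp [pvMark]
  | cons c rest ih =>
    intro seen b h1 h2
    have hstep : (if PySem.Chars.isIn [c] b = false then b ++ [c] else b ++ [PySem.Chars.upperChar c])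
        = b ++ [if c ∈ seen then PySem.Chars.upperChar c else c] := by
      by_cases hs : c ∈ seen
      · have hb : c ∈ b := h1 c hs
        rw [if_pos hs, if_neg (by simp only [Bool.not_eq_false]; exact (pvIsIn_singleton c b).2 hb)]
      · rw [if_neg hs]
        by_cases hb : c ∈ b
        · have hupc : PySem.Chars.upperChar c = c := (h2 c hb).resolve_left hs
          rw [if_neg (by simp only [Bool.not_eq_false]; exact (pvIsIn_singleton c b).2 hb), hupc]
        · rw [if_pos (pvIsIn_singleton_false c b hb)]
    have hinv1 : ∀ d, d ∈ seen ++ [c] → d ∈ b ++ [if c ∈ seen then PySem.Chars.upperChar c else c] := by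
      intro d hd
      rcases List.mem_append.1 hd with h | h
      · exact List.mem_append_left _ (h1 d h)
      · simp only [List.mem_singleton] at h
        subst h
        by_cases hs : d ∈ seen
        · exact List.mem_append_left _ (h1 d hs)
        · rw [if_neg hs]; exact List.mem_append_right _ (by simp)
    have hinv2 : ∀ d, d ∈ b ++ [if c ∈ seen then PySem.Chars.upperChar c else c] →
        d ∈ seen ++ [c] ∨ PySem.Chars.upperChar d = d := by
      intro d hd
      rcases List.mem_append.1 hd with h | h
      · rcases h2 d h with h' | h'
        · exact Or.inl (List.mem_append_left _ h')
        · exact Or.inr h'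
      · simp only [List.mem_singleton] at h
        subst h
        by_cases hs : c ∈ seen
        · rw [if_pos hs]
          exact Or.inr (pvUp_idem c)
        · rw [if_neg hs]
          exact Or.inl (List.mem_append_right _ (by simp))
    simp only [List.foldl_cons, hstep, pvMark]
    rw [ih (seen ++ [c]) _ hinv1 hinv2]
    simp

theorem pvMark_length (rest : List Char) : ∀ seen, (pvMark seen rest).length = rest.length := by
  induction rest with
  | nil => intro; rfl
  | cons c rest ih => intro seen; simp [pvMark, ih]

theorem pvMark_getElem (rest : List Char) : ∀ (seen : List Char) (k : Nat) (hk : k < rest.length),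
    (pvMark seen rest)[k]'(by rw [pvMark_length]; exact hk)
      = if rest[k] ∈ seen ++ rest.take k then PySem.Chars.upperChar rest[k] else rest[k] := by
  induction rest with
  | nil => intro _ k hk; simp at hk
  | cons c rest ih =>
    intro seen k hk
    cases k with
    | zero => simp [pvMark]
    | succ k =>
      have hk' : k < rest.length := by simp at hk; omega
      simp only [pvMark, List.getElem_cons_succ, List.take_succ_cons]
      rw [ih (seen ++ [c]) k hk']
      simp [List.append_assoc]

theorem pvFoldSetdefault (l : List Char) : ∀ (s : Int) (d : PySem.Dict Char Int) (c : Char),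
    ((PySem.List.enumerate l s).foldl (fun d p => d.setdefault p.2 p.1) d).getD c (-1)
      = if d.contains c then d.getD c (-1)
        else if c ∈ l then s + l.idxOf c else -1 := by
  induction l with
  | nil =>
    intro s d c
    simp only [PySem.List.enumerate, List.foldl_nil, List.not_mem_nil, if_false]
    by_cases hd : d.contains c
    · rw [if_pos hd]
    · rw [if_neg hd]
      unfold PySem.Dict.getD
      rw [PySem.Dict.contains_eq_isSome_get?] at hd
      cases hget : d.get? c with
      | none => simp
      | some v => rw [hget] at hd; simp at hd
  | cons a rest ih =>
    intro s d c
    rw [PySem.List.enumerate_cons, List.foldl_cons]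
    rw [ih (s + 1) (d.setdefault a s) c]
    by_cases hca : c = a
    · subst hca
      rw [if_pos (by rw [PySem.Dict.contains_setdefault]; simp)]
      rw [PySem.Dict.getD_setdefault_self]
      by_cases hd : d.contains c
      · rw [if_pos hd]
        unfold PySem.Dict.getD
        rw [PySem.Dict.contains_eq_isSome_get?] at hd
        cases hget : d.get? c with
        | none => rw [hget] at hd; simp at hd
        | some v => simp
      · rw [if_neg hd, if_pos (List.mem_cons_self)]
        unfold PySem.Dict.getD
        rw [PySem.Dict.contains_eq_isSome_get?] at hd
        cases hget : d.get? c with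
        | none => simp [List.idxOf_cons_self]
        | some v => rw [hget] at hd; simp at hd
    · have hcont : (d.setdefault a s).contains c = d.contains c := by
        rw [PySem.Dict.contains_setdefault]
        simp [hca]
      have hgd : (d.setdefault a s).getD c (-1) = d.getD c (-1) := by
        unfold PySem.Dict.getD
        rw [PySem.Dict.get?_setdefault_of_ne d s hca]
      rw [hcont, hgd]
      by_cases hd : d.contains c
      · rw [if_pos hd, if_pos hd]
      · rw [if_neg hd, if_neg hd]
        by_cases hm : c ∈ rest
        · rw [if_pos hm, if_pos (List.mem_cons_of_mem _ hm)]
          rw [List.idxOf_cons_ne _ (Ne.symm hca)]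
          push_cast
          ring
        · rw [if_neg hm, if_neg (by simp [hca, hm])]

theorem pvIdxOf_eq_iff (l : List Char) : ∀ (k : Nat) (hk : k < l.length),
    (l.idxOf (l[k]'hk) = k ↔ (l[k]'hk) ∉ l.take k) := by
  induction l with
  | nil => intro k hk; simp at hk
  | cons a rest ih =>
    intro k hk
    cases k with
    | zero => simp
    | succ k =>
      have hk' : k < rest.length := by simp at hk; omega
      simp only [List.getElem_cons_succ, List.take_succ_cons, List.mem_cons]
      by_cases hca : (rest[k]'hk') = a
      · rw [hca, List.idxOf_cons_self]
        simp [hca]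
      · rw [List.idxOf_cons_ne _ (Ne.symm hca)]
        have hiff := ih k hk'
        constructor
        · intro h hm
          rcases hm with h' | h'
          · exact hca h'
          · exact (hiff.1 (by omega)) h'
        · intro h
          have : rest.idxOf (rest[k]'hk') = k := hiff.2 (fun hm => h (Or.inr hm))
          omega

theorem pvNodup_of_len (l : List Char) (h : l.length = (PySem.Set.ofList l).length) : l.Nodup := by
  have h1 : (PySem.Set.ofList l).Nodup := PySem.Set.nodup_ofList l
  have hcard : (PySem.Set.ofList l).toFinset = l.toFinset := by
    ext x; simp [List.mem_toFinset, PySem.Set.mem_ofList]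
  have hc1 : (PySem.Set.ofList l).toFinset.card = (PySem.Set.ofList l).length :=
    List.toFinset_card_of_nodup h1
  have hlen : l.toFinset.card = l.length := by rw [← hcard, hc1, ← h]
  rw [← Multiset.coe_nodup]
  rw [← Multiset.toFinset_card_eq_card_iff_nodup]
  simpa using hlen

theorem pvMark_nodup (l : List Char) (h : l.Nodup) : pvMark [] l = l := by
  apply List.ext_getElem (by rw [pvMark_length])
  intro k h1 h2
  rw [pvMark_getElem l [] k h2, if_neg]
  simp only [List.nil_append]
  intro hm
  obtain ⟨j, hj, hjk⟩ := List.mem_iff_getElem.1 hm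
  have hjlt : j < k := by simp only [List.length_take] at hj; omega
  have hjl : j < l.length := by omega
  have hne := List.pairwise_iff_getElem.1 h j k hjl h2 hjlt
  rw [List.getElem_take] at hjk
  exact hne hjk

theorem pvAltList (l : List Char) :
    ((PySem.List.enumerate l).map
      (fun p => if ((PySem.List.enumerate l).foldl (fun d p => d.setdefault p.2 p.1) PySem.Dict.empty).getD p.2 (-1) == p.1
                then p.2 else PySem.Chars.upperChar p.2)) = pvMark [] l := by
  apply List.ext_getElem (by rw [pvMark_length]; simp [PySem.List.length_enumerate])
  intro k h1 h2
  have hk : k < l.length := by simpa [PySem.List.length_enumerate] using h1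
  rw [List.getElem_map, PySem.List.getElem_enumerate l 0 k (by simpa [PySem.List.length_enumerate] using hk)]
  rw [pvMark_getElem l [] k hk]
  simp only [List.nil_append]
  have hcond : ((PySem.List.enumerate l).foldl (fun d p => d.setdefault p.2 p.1) PySem.Dict.empty).getD (l[k]'hk) (-1)
      = (l.idxOf (l[k]'hk) : Int) := by
    rw [pvFoldSetdefault l 0 PySem.Dict.empty (l[k]'hk)]
    rw [if_neg (by simp [PySem.Dict.empty, PySem.Dict.contains]), if_pos (l.getElem_mem hk)]
    ring
  rw [hcond]
  by_cases hm : (l[k]'hk) ∈ l.take k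
  · rw [if_pos hm, if_neg]
    intro hbeq
    rw [beq_iff_eq] at hbeq
    have heq : l.idxOf (l[k]'hk) = k := by omega
    exact (pvIdxOf_eq_iff l k hk).1 heq hm
  · rw [if_neg hm, if_pos]
    have heq : l.idxOf (l[k]'hk) = k := (pvIdxOf_eq_iff l k hk).2 hm
    rw [beq_iff_eq, heq]
    omega

theorem pvAltEq (word : String) :
    make_second_appearance_of_letter_uppercase_alt word = String.ofList (pvMark [] word.toList) := by
  unfold make_second_appearance_of_letter_uppercase_alt
  show String.ofList ((PySem.List.enumerate word.toList).map
      (fun p => if ((PySem.List.enumerate word.toList).foldl (fun d p => d.setdefault p.2 p.1) PySem.Dict.empty).getD p.2 (-1) == p.1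
                then p.2 else PySem.Chars.upperChar p.2)) = _
  rw [pvAltList]

-- ===== VERDICT (by name: the statement is the Claim_ definition above) =====
theorem make_second_appearance_of_letter_uppercase_spec : Claim_equal_make_second_appearance_of_letter_uppercase := by
  intro word _
  unfold Spec_make_second_appearance_of_letter_uppercase
  rw [pvAltEq]
  unfold make_second_appearance_of_letter_uppercase
  split_ifs with h
  · rw [pvMark_nodup _ (pvNodup_of_len _ h), String.ofList_toList]
  · rw [pvFoldA word.toList [] [] (by simp) (by simp)]
    simp
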